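-- pv_equiv track=rewrite | github.com/Oshmetochki/pp2 | ip_maska_check.py | mask_check
-- ===== SOURCE A (Python) =====
-- def mask_check(mask):                   #Маску переводим в бинарное число + склеиваем в стр
--
--     mask=[str(bin(i)) for i in mask]
--     mask=[i.replace('0b','') for i in mask]
--     list=[]
--     for i in mask:
--
--         if (a:=len(i))<8:
--             a=8-a
--             i='0'*a+i
--         elif a>8:
--             return False
--         list.append(i)
--
--     list=''.join(list)
--     return chekkk(list)
--
-- def chekkk(string=str):
--     a=0
--     for i in range(len(string)-1):
--         if string[i]<string[i+1]:
--             a=1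
--     return a==0
-- ===== SOURCE B (Python) =====
-- # Netmask-byte validation as a two-state scan over the ints themselves:
-- # a valid mask is a run of 255s, then at most one "partial" byte, then only 0s.
-- PARTIAL = {0, 128, 192, 224, 240, 248, 252, 254, 255}
--
-- def mask_check(mask):
--     seen_partial = False
--     for b in mask:
--         if seen_partial:
--             if b != 0:
--                 return False
--         elif b != 255:
--             if b in PARTIAL:
--                 seen_partial = True
--             else:
--                 return False
--     return True
-- ===== Notes on version B (the rewrite author's own statement) =====
-- stated objective: faster
-- what changed: Instead of rendering every byte as a padded binary string, joining them and scanning characters for an increasing adjacent pair, B folds a two-state machine over the ints themselves (run of 255s, then at most one partial-mask byte from a 9-element set, then only 0s), with early exit and no string construction.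
import Mathlib
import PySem

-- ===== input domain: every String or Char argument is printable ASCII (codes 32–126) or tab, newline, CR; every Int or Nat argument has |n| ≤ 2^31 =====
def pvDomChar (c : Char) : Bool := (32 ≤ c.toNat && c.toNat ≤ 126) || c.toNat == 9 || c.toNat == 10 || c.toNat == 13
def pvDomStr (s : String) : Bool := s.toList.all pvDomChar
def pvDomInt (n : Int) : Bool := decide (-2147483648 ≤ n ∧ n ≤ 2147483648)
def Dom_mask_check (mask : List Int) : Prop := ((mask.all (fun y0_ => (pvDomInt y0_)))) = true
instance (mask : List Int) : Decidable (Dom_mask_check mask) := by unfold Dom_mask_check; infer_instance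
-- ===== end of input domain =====

-- B replaces A's build-a-binary-string-and-scan-characters check by a two-state scan
-- over the byte values themselves (run of 255s, then at most one partial byte, then 0s).

-- ===== PORT A =====
-- the for-loop of mask_check: pads each binary string to 8 chars, appends to 'list';
-- 'return False' on a string longer than 8 becomes the none result
def pvBuildA : List (List Char) → List (List Char) → Option (List (List Char))
  | [], acc => some acc
  | i :: rest, acc =>
      let a := i.length
      if a < 8 then pvBuildA rest (acc ++ [List.replicate (8 - a) '0' ++ i])
      else if a > 8 then none
      else pvBuildA rest (acc ++ [i])

-- chekkk: the loop indices i, i+1 are always in range, so getD's default ' ' is never used (exact)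
def chekkk (s : List Char) : Bool :=
  let a : Int := (List.range (s.length - 1)).foldl
    (fun a i => if s.getD i ' ' < s.getD (i + 1) ' ' then 1 else a) 0
  a == 0

def mask_check (mask : List Int) : Bool :=
  let m1 := mask.map (fun i => PySem.Int.toBinChars0b i)            -- [str(bin(i)) for i in mask]
  let m2 := m1.map (fun i => PySem.Chars.replace i ['0', 'b'] [])   -- [i.replace('0b','') for i in mask]
  match pvBuildA m2 [] with
  | none => false
  | some l => chekkk l.flatten                                      -- chekkk(''.join(list))

-- ===== PORT B =====
def pvPARTIAL : PySem.Set Int := PySem.Set.ofList [0, 128, 192, 224, 240, 248, 252, 254, 255]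

-- the for-loop of B with its seen_partial flag; early returns become false results
def pvScanB : Bool → List Int → Bool
  | _, [] => true
  | true, b :: rest => if b ≠ 0 then false else pvScanB true rest
  | false, b :: rest =>
      if b ≠ 255 then
        if PySem.Set.contains pvPARTIAL b then pvScanB true rest else false
      else pvScanB false rest

def mask_check_alt (mask : List Int) : Bool := pvScanB false mask

-- ===== PRECONDITION & SPEC =====
def Spec_mask_check (mask : List Int) (out : Bool) : Prop := out = mask_check_alt mask
instance (mask : List Int) (out : Bool) : Decidable (Spec_mask_check mask out) := by unfold Spec_mask_check; infer_instance

-- ===== CLAIM (what is proved, stated in full; the proofs are below) =====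
def Claim_equal_mask_check : Prop := ∀ (mask : List Int), Dom_mask_check mask → Spec_mask_check mask (mask_check mask)

-- ===== LEMMAS AND PROOFS =====

-- proof-side vocabulary
def pvPad8 (d : List Char) : List Char :=
  if d.length < 8 then List.replicate (8 - d.length) '0' ++ d else d

def pvBlk (i : Int) : List Char := pvPad8 (PySem.Int.toBinChars i)

def pvSok : List Int := [0, 128, 192, 224, 240, 248, 252, 254, 255]

lemma pv_bool_ext (a b : Bool) (h : a = true ↔ b = true) : a = b := by
  rcases Bool.dichotomy a with ha | ha <;> rcases Bool.dichotomy b with hb | hb <;> simp_all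

-- Nat.toDigits 2 produces only '0'/'1' characters, never 'b'
lemma pv_noB_core : ∀ (fuel n : Nat) (acc : List Char), 'b' ∉ acc →
    'b' ∉ Nat.toDigitsCore 2 fuel n acc := by
  intro fuel
  induction fuel with
  | zero => intro n acc h; simpa [Nat.toDigitsCore] using h
  | succ f ih =>
      intro n acc h
      have hd : 'b' ≠ Nat.digitChar (n % 2) := by
        have : n % 2 = 0 ∨ n % 2 = 1 := by omega
        rcases this with h2 | h2 <;> simp [h2, Nat.digitChar]
      simp only [Nat.toDigitsCore]
      split
      · simp_all
      · exact ih _ _ (by simp_all)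

lemma pv_noB (n : Nat) : 'b' ∉ Nat.toDigits 2 n := by
  exact pv_noB_core _ _ _ (by simp)

-- replace's scanner leaves a 'b'-free tail untouched when searching for "0b"
lemma pv_replace_go_noB : ∀ (fuel : Nat) (l acc : List Char), 'b' ∉ l →
    PySem.Chars.replace.go ['0', 'b'] [] fuel l acc = acc.reverse ++ l := by
  intro fuel
  induction fuel with
  | zero => intro l acc _; rfl
  | succ f ih =>
      intro l acc h
      cases l with
      | nil => simp [PySem.Chars.replace.go]
      | cons c t =>
          have hpre : (['0', 'b'].isPrefixOf (c :: t)) = false := by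
            cases t with
            | nil => simp [List.isPrefixOf]
            | cons c' t' =>
                simp only [List.mem_cons, not_or] at h
                simp [List.isPrefixOf]
                intro _
                exact h.2.1
          have ht : 'b' ∉ t := by simp_all
          simp [PySem.Chars.replace.go, hpre, ih t (c :: acc) ht]

-- str(bin(i)).replace('0b','') is exactly format(i, 'b')
lemma pv_digits_eq (i : Int) :
    PySem.Chars.replace (PySem.Int.toBinChars0b i) ['0', 'b'] [] = PySem.Int.toBinChars i := by
  unfold PySem.Chars.replace PySem.Int.toBinChars0b PySem.Int.toBinChars
  rw [if_neg (by simp : ¬ ((['0', 'b'] : List Char).isEmpty = true))]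
  by_cases hi : i < 0
  · rw [if_pos hi, if_pos hi]
    rw [show ('-' :: '0' :: 'b' :: Nat.toDigits 2 i.natAbs).length
        = (Nat.toDigits 2 i.natAbs).length + 3 from by simp]
    have h1 : (['0', 'b'].isPrefixOf ('-' :: '0' :: 'b' :: Nat.toDigits 2 i.natAbs)) = false := by
      simp [List.isPrefixOf]
    have h2 : (['0', 'b'].isPrefixOf ('0' :: 'b' :: Nat.toDigits 2 i.natAbs)) = true := by
      simp [List.isPrefixOf]
    simp only [PySem.Chars.replace.go, h1, Bool.false_eq_true, if_false, h2, if_pos,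
      List.drop_succ_cons, List.drop_zero, List.reverse_nil, List.nil_append]
    simpa using pv_replace_go_noB _ _ _ (pv_noB i.natAbs)
  · rw [if_neg hi, if_neg hi]
    rw [show ('0' :: 'b' :: Nat.toDigits 2 i.toNat).length
        = (Nat.toDigits 2 i.toNat).length + 2 from by simp]
    have h2 : (['0', 'b'].isPrefixOf ('0' :: 'b' :: Nat.toDigits 2 i.toNat)) = true := by
      simp [List.isPrefixOf]
    simp only [PySem.Chars.replace.go, h2, if_pos, List.drop_succ_cons, List.drop_zero,
      List.reverse_nil, List.nil_append]
    simpa using pv_replace_go_noB _ _ _ (pv_noB i.toNat)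

lemma pv_m2_eq (mask : List Int) :
    mask.map (fun i => PySem.Chars.replace (PySem.Int.toBinChars0b i) ['0', 'b'] [])
      = mask.map PySem.Int.toBinChars := by
  apply List.map_congr_left
  intro i _
  exact pv_digits_eq i

-- lower bound: n < 2 ^ (number of binary digits of n)
lemma pv_toDigits_lower : ∀ (fuel n : Nat), n < fuel →
    n < 2 ^ (Nat.toDigitsCore 2 fuel n []).length := by
  intro fuel
  induction fuel with
  | zero => omega
  | succ f ih =>
      intro n hn
      simp only [Nat.toDigitsCore]
      by_cases h0 : n / 2 = 0
      · rw [if_pos h0]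
        have : n < 2 := by omega
        simpa using this
      · rw [if_neg h0, Nat.toDigitsCore_lens_eq]
        have hlt : n / 2 < f := by omega
        have := ih (n / 2) hlt
        have h2 : n < 2 * 2 ^ (Nat.toDigitsCore 2 f (n / 2) []).length := by omega
        calc n < 2 * 2 ^ (Nat.toDigitsCore 2 f (n / 2) []).length := h2
          _ = 2 ^ ((Nat.toDigitsCore 2 f (n / 2) []).length + 1) := by ring

lemma pv_toDigits_big (n : Nat) (h : 128 ≤ n) : 8 ≤ (Nat.toDigits 2 n).length := by
  by_contra hle
  have h7 : (Nat.toDigits 2 n).length ≤ 7 := by omega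
  have hp : 2 ^ (Nat.toDigits 2 n).length ≤ 2 ^ 7 := Nat.pow_le_pow_right (by omega) h7
  have hlow := pv_toDigits_lower (n + 1) n (by omega)
  unfold Nat.toDigits at hp
  exact absurd (lt_of_lt_of_le hlow hp) (by omega)

lemma pv_toDigits_ne_nil (n : Nat) : Nat.toDigits 2 n ≠ [] := by
  rcases Nat.eq_zero_or_pos n with rfl | hn
  · decide
  · intro hcon
    have hlow := pv_toDigits_lower (n + 1) n (by omega)
    unfold Nat.toDigits at hcon
    rw [hcon] at hlow
    simp at hlow
    omega

lemma pv_blk_ne_nil (i : Int) : pvBlk i ≠ [] := by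
  unfold pvBlk pvPad8
  split
  · next h8 =>
      intro hcon
      have hl := congrArg List.length hcon
      simp at hl
      omega
  · unfold PySem.Int.toBinChars
    split
    · simp
    · simp [pv_toDigits_ne_nil]

-- per-byte facts, decided over all 256 byte values
set_option maxRecDepth 100000 in
lemma pv_byteAll : ((List.range 256).all (fun n =>
    decide ((PySem.Int.toBinChars (n : Int)).length ≤ 8) &&
    (decide (List.IsChain (fun x y : Char => y ≤ x) (pvBlk (n : Int))) ==
      decide ((n : Int) ∈ pvSok)))) = true := by
  decide

set_option maxRecDepth 100000 in
lemma pv_negAll : ((List.range 127).all (fun n =>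
    !decide (List.IsChain (fun x y : Char => y ≤ x) (pvBlk (-((n : Int) + 1)))))) = true := by
  decide

lemma pv_byteFacts (n : Nat) (h : n < 256) :
    ((PySem.Int.toBinChars (n : Int)).length ≤ 8) ∧
    (List.IsChain (fun x y : Char => y ≤ x) (pvBlk (n : Int)) ↔ (n : Int) ∈ pvSok) := by
  have hb := List.all_eq_true.mp pv_byteAll n (List.mem_range.mpr h)
  simp only [Bool.and_eq_true, decide_eq_true_eq, beq_iff_eq, decide_eq_decide] at hb
  exact hb

lemma pv_negFacts (n : Nat) (h : n < 127) :
    ¬ List.IsChain (fun x y : Char => y ≤ x) (pvBlk (-((n : Int) + 1))) := by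
  have hb := List.all_eq_true.mp pv_negAll n (List.mem_range.mpr h)
  simp only [Bool.not_eq_eq_eq_not, Bool.not_true, decide_eq_false_iff_not] at hb
  exact hb

set_option maxRecDepth 100000 in
lemma pv_bndAll : (pvSok.all (fun i => pvSok.all (fun j =>
    ((pvBlk i).getLast?.all (fun x => (pvBlk j).head?.all (fun y => decide (y ≤ x)))) ==
      decide (i = 255 ∨ j = 0)))) = true := by
  decide

lemma pv_opt_all (o p : Option Char) :
    ((o.all (fun x => p.all (fun y => decide (y ≤ x)))) = true) ↔
      (∀ x ∈ o, ∀ y ∈ p, y ≤ x) := by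
  cases o <;> cases p <;> simp

lemma pv_okA_iff (i : Int) :
    ((PySem.Int.toBinChars i).length ≤ 8 ∧
      List.IsChain (fun x y : Char => y ≤ x) (pvBlk i)) ↔ i ∈ pvSok := by
  rcases lt_or_ge i 0 with hneg | hpos
  · have hnot : i ∉ pvSok := by simp [pvSok]; omega
    rcases lt_or_ge i (-127) with hbig | hsmall
    · -- |i| ≥ 128: the '-' plus at least 8 digits make the string longer than 8
      have h128 : 128 ≤ i.natAbs := by omega
      have hlen : ¬ (PySem.Int.toBinChars i).length ≤ 8 := by
        simp only [PySem.Int.toBinChars, hneg, if_pos, List.length_cons]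
        have := pv_toDigits_big i.natAbs h128
        omega
      exact ⟨fun hc => absurd hc.1 hlen, fun hm => absurd hm hnot⟩
    · -- -127 ≤ i ≤ -1: the padded block contains '-' followed by '1', no chain
      obtain ⟨n, hn, rfl⟩ : ∃ n : Nat, n < 127 ∧ -((n : Int) + 1) = i :=
        ⟨(-i).toNat - 1, by omega, by omega⟩
      exact ⟨fun hc => absurd hc.2 (pv_negFacts n hn), fun hm => absurd hm hnot⟩
  · rcases lt_or_ge i 256 with hlt | hge
    · obtain ⟨n, hn, rfl⟩ : ∃ n : Nat, n < 256 ∧ (n : Int) = i := ⟨i.toNat, by omega, by omega⟩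
      have h := pv_byteFacts n hn
      exact ⟨fun hc => h.2.mp hc.2, fun hm => ⟨h.1, h.2.mpr hm⟩⟩
    · have hnot : i ∉ pvSok := by simp [pvSok]; omega
      have hlen : ¬ (PySem.Int.toBinChars i).length ≤ 8 := by
        have hi : ¬ i < 0 := by omega
        have hlow := pv_toDigits_lower (i.toNat + 1) i.toNat (by omega)
        intro hle
        have heq : (PySem.Int.toBinChars i).length = (Nat.toDigits 2 i.toNat).length := by
          simp [PySem.Int.toBinChars, hi]
        rw [heq] at hle
        have hp : 2 ^ (Nat.toDigits 2 i.toNat).length ≤ 2 ^ 8 :=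
          Nat.pow_le_pow_right (by omega) hle
        unfold Nat.toDigits at hp
        exact absurd (lt_of_lt_of_le hlow hp) (by omega)
      exact ⟨fun hc => absurd hc.1 hlen, fun hm => absurd hm hnot⟩

-- the sticky flag of chekkk's loop
lemma pv_fold01 (s : List Char) (l : List Nat) (a0 : Int) :
    (l.foldl (fun a i => if s.getD i ' ' < s.getD (i + 1) ' ' then 1 else a) a0)
      = if ∃ i ∈ l, s.getD i ' ' < s.getD (i + 1) ' ' then 1 else a0 := by
  induction l generalizing a0 with
  | nil => simp
  | cons hd tl ih =>
      by_cases hp : s.getD hd ' ' < s.getD (hd + 1) ' '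
      · rw [List.foldl_cons, if_pos hp, ih]
        have hex : ∃ i ∈ hd :: tl, s.getD i ' ' < s.getD (i + 1) ' ' := ⟨hd, by simp, hp⟩
        rw [if_pos hex]
        by_cases h2 : ∃ i ∈ tl, s.getD i ' ' < s.getD (i + 1) ' '
        · rw [if_pos h2]
        · rw [if_neg h2]
      · rw [List.foldl_cons, if_neg hp, ih]
        have hiff : (∃ i ∈ hd :: tl, s.getD i ' ' < s.getD (i + 1) ' ')
            ↔ (∃ i ∈ tl, s.getD i ' ' < s.getD (i + 1) ' ') := by
          constructor
          · rintro ⟨i, hi, hlt⟩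
            rcases List.mem_cons.mp hi with rfl | hi'
            · exact absurd hlt hp
            · exact ⟨i, hi', hlt⟩
          · rintro ⟨i, hi, hlt⟩
            exact ⟨i, List.mem_cons_of_mem _ hi, hlt⟩
        rw [if_congr hiff rfl rfl]

lemma pv_chekkk_iff (s : List Char) :
    chekkk s = true ↔ List.IsChain (fun x y : Char => y ≤ x) s := by
  simp only [chekkk]
  rw [pv_fold01, List.isChain_iff_getElem]
  by_cases hex : ∃ i ∈ List.range (s.length - 1), s.getD i ' ' < s.getD (i + 1) ' '
  · rw [if_pos hex]
    obtain ⟨j, hj, hlt⟩ := hex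
    simp only [List.mem_range] at hj
    rw [List.getD_eq_getElem s ' ' (by omega), List.getD_eq_getElem s ' ' (by omega)] at hlt
    constructor
    · intro h
      exact absurd h (by simp)
    · intro hall
      exact absurd hlt (not_lt.mpr (hall j (by omega)))
  · rw [if_neg hex]
    constructor
    · intro _ i hi
      refine not_lt.mp (fun hlt => hex ⟨i, List.mem_range.mpr (by omega), ?_⟩)
      rw [List.getD_eq_getElem s ' ' (by omega), List.getD_eq_getElem s ' ' (by omega)]
      exact hlt
    · intro _
      simp

-- the build loop succeeds iff every string fits in 8 chars, and then returns the padded blocks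
lemma pv_buildA_spec : ∀ (ds : List (List Char)) (acc : List (List Char)),
    pvBuildA ds acc =
      if ∀ d ∈ ds, d.length ≤ 8 then some (acc ++ ds.map pvPad8) else none := by
  intro ds
  induction ds with
  | nil => intro acc; simp [pvBuildA]
  | cons d rest ih =>
      intro acc
      simp only [pvBuildA]
      by_cases h8 : d.length < 8
      · rw [if_pos h8, ih]
        by_cases hall : ∀ e ∈ rest, e.length ≤ 8
        · have hcall : ∀ e ∈ d :: rest, e.length ≤ 8 := by
            intro e he
            rcases List.mem_cons.mp he with rfl | he'
            · omega
            · exact hall e he'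
          rw [if_pos hall, if_pos hcall, List.map_cons,
            show pvPad8 d = List.replicate (8 - d.length) '0' ++ d from by simp [pvPad8, h8]]
          simp
        · have hcall : ¬ ∀ e ∈ d :: rest, e.length ≤ 8 :=
            fun hcon => hall (fun e he => hcon e (List.mem_cons_of_mem _ he))
          rw [if_neg hall, if_neg hcall]
      · by_cases hgt : d.length > 8
        · have hcall : ¬ ∀ e ∈ d :: rest, e.length ≤ 8 :=
            fun hcon => absurd (hcon d (by simp)) (by omega)
          rw [if_neg h8, if_pos hgt, if_neg hcall]
        · rw [if_neg h8, if_neg hgt, ih]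
          have hpad : pvPad8 d = d := by simp [pvPad8, h8]
          by_cases hall : ∀ e ∈ rest, e.length ≤ 8
          · have hcall : ∀ e ∈ d :: rest, e.length ≤ 8 := by
              intro e he
              rcases List.mem_cons.mp he with rfl | he'
              · omega
              · exact hall e he'
            rw [if_pos hall, if_pos hcall, List.map_cons, hpad]
            simp
          · have hcall : ¬ ∀ e ∈ d :: rest, e.length ≤ 8 :=
              fun hcon => hall (fun e he => hcon e (List.mem_cons_of_mem _ he))
            rw [if_neg hall, if_neg hcall]

lemma pv_maskA_true_iff (mask : List Int)
    (hall : ∀ i ∈ mask, (PySem.Int.toBinChars i).length ≤ 8) :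
    (mask_check mask = true ↔
      List.IsChain (fun x y : Char => y ≤ x) ((mask.map pvBlk).flatten)) := by
  have hall' : ∀ d ∈ mask.map PySem.Int.toBinChars, d.length ≤ 8 := by
    intro d hd
    rcases List.mem_map.mp hd with ⟨i, hi, rfl⟩
    exact hall i hi
  unfold mask_check
  simp only [List.map_map, Function.comp_def]
  rw [pv_m2_eq, pv_buildA_spec, if_pos hall']
  simp only [List.nil_append, List.map_map, Function.comp_def]
  exact pv_chekkk_iff _

lemma pv_maskA_false (mask : List Int)
    (hall : ¬ ∀ i ∈ mask, (PySem.Int.toBinChars i).length ≤ 8) :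
    mask_check mask = false := by
  have hall' : ¬ ∀ d ∈ mask.map PySem.Int.toBinChars, d.length ≤ 8 := by
    intro hcon
    exact hall (fun i hi => hcon _ (List.mem_map_of_mem hi))
  unfold mask_check
  simp only [List.map_map, Function.comp_def]
  rw [pv_m2_eq, pv_buildA_spec, if_neg hall']

-- the inter-block boundary condition is exactly "previous byte 255 or next byte 0"
lemma pv_boundary (i j : Int) (hi : i ∈ pvSok) (hj : j ∈ pvSok) :
    ((∀ x ∈ (pvBlk i).getLast?, ∀ y ∈ (pvBlk j).head?, y ≤ x) ↔ (i = 255 ∨ j = 0)) := by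
  have h := List.all_eq_true.mp (List.all_eq_true.mp pv_bndAll i hi) j hj
  have h2 := beq_iff_eq.mp h
  rw [← pv_opt_all, h2, decide_eq_true_eq]

lemma pv_scanB_true (l : List Int) : pvScanB true l = true ↔ ∀ b ∈ l, b = 0 := by
  induction l with
  | nil => simp [pvScanB]
  | cons b rest ih =>
      by_cases hb : b = 0
      · simp [pvScanB, hb, ih]
      · simp [pvScanB, hb]

lemma pv_contains_iff (b : Int) : PySem.Set.contains pvPARTIAL b = true ↔ b ∈ pvSok := by
  have h : pvPARTIAL = pvSok := by decide
  rw [h]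
  simp [PySem.Set.contains, pvSok]

lemma pv_zeros_chain (b : Int) (l : List Int) (h : ∀ x ∈ l, x = 0) :
    List.IsChain (fun i j : Int => i = 255 ∨ j = 0) (b :: l) := by
  induction l generalizing b with
  | nil => simp
  | cons c t ih =>
      have hc : c = 0 := h c (by simp)
      rw [List.isChain_cons_cons]
      exact ⟨Or.inr hc, ih c (fun x hx => h x (by simp [hx]))⟩

lemma pv_chain_zeros (b : Int) (l : List Int) (hb : b ≠ 255)
    (h : List.IsChain (fun i j : Int => i = 255 ∨ j = 0) (b :: l)) : ∀ x ∈ l, x = 0 := by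
  induction l generalizing b with
  | nil => simp
  | cons c t ih =>
      rw [List.isChain_cons_cons] at h
      have hc : c = 0 := by
        rcases h.1 with h' | h'
        · exact absurd h' hb
        · exact h'
      intro x hx
      rcases List.mem_cons.mp hx with rfl | hx'
      · exact hc
      · exact ih c (by omega) h.2 x hx'

lemma pv_isChain_cons_head {α : Type} {R : α → α → Prop} (a : α) (l : List α) :
    List.IsChain R (a :: l) ↔ (∀ y ∈ l.head?, R a y) ∧ List.IsChain R l := by
  cases l <;> simp

lemma pv_scanB_false (l : List Int) :
    pvScanB false l = true ↔
      (∀ b ∈ l, b ∈ pvSok) ∧ List.IsChain (fun i j : Int => i = 255 ∨ j = 0) l := by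
  induction l with
  | nil => simp [pvScanB]
  | cons b rest ih =>
      by_cases h255 : b = 255
      · subst h255
        rw [show pvScanB false (255 :: rest) = pvScanB false rest from by
          simp only [pvScanB]
          rw [if_neg (by simp : ¬ (255 : Int) ≠ 255)]]
        rw [ih, pv_isChain_cons_head]
        constructor
        · rintro ⟨hall, hch⟩
          refine ⟨?_, ?_, hch⟩
          · intro x hx
            rcases List.mem_cons.mp hx with rfl | hx'
            · simp [pvSok]
            · exact hall x hx'
          · intro y _
            exact Or.inl rfl
        · rintro ⟨hall, _, hch⟩
          exact ⟨fun x hx => hall x (List.mem_cons_of_mem _ hx), hch⟩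
      · by_cases hS : b ∈ pvSok
        · have hcon : PySem.Set.contains pvPARTIAL b = true := (pv_contains_iff b).mpr hS
          rw [show pvScanB false (b :: rest) = pvScanB true rest from by
            simp only [pvScanB]
            rw [if_pos h255, if_pos hcon]]
          rw [pv_scanB_true]
          constructor
          · intro hz
            refine ⟨?_, pv_zeros_chain b rest hz⟩
            intro x hx
            rcases List.mem_cons.mp hx with rfl | hx'
            · exact hS
            · rw [hz x hx']
              simp [pvSok]
          · rintro ⟨_, hch⟩
            exact pv_chain_zeros b rest h255 hch
        · have hcon : PySem.Set.contains pvPARTIAL b = false := by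
            rcases Bool.dichotomy (PySem.Set.contains pvPARTIAL b) with hc | hc
            · exact hc
            · exact absurd ((pv_contains_iff b).mp hc) hS
          rw [show pvScanB false (b :: rest) = false from by
            simp only [pvScanB]
            rw [if_pos h255, if_neg (by rw [hcon]; exact Bool.false_ne_true)]]
          simp only [Bool.false_eq_true, false_iff]
          rintro ⟨hall, _⟩
          exact hS (hall b (by simp))

-- main equivalence
lemma pv_main (mask : List Int) : mask_check mask = mask_check_alt mask := by
  by_cases hS : ∀ i ∈ mask, i ∈ pvSok
  · -- every byte is a valid mask byte: both sides reduce to the adjacency chain on bytes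
    have hlen : ∀ i ∈ mask, (PySem.Int.toBinChars i).length ≤ 8 := by
      intro i hi
      exact ((pv_okA_iff i).mpr (hS i hi)).1
    have hne : [] ∉ mask.map pvBlk := by
      intro hcon
      rcases List.mem_map.mp hcon with ⟨i, _, hblk⟩
      exact pv_blk_ne_nil i hblk
    have hblocks : ∀ l ∈ mask.map pvBlk, List.IsChain (fun x y : Char => y ≤ x) l := by
      intro l hl
      rcases List.mem_map.mp hl with ⟨i, hi, rfl⟩
      exact ((pv_okA_iff i).mpr (hS i hi)).2
    have hbnd : List.IsChain
          (fun l₁ l₂ : List Char => ∀ x ∈ l₁.getLast?, ∀ y ∈ l₂.head?, y ≤ x)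
          (mask.map pvBlk)
        ↔ List.IsChain (fun i j : Int => i = 255 ∨ j = 0) mask := by
      rw [List.isChain_map]
      rw [List.isChain_iff_getElem, List.isChain_iff_getElem]
      constructor
      · intro h i hi
        exact (pv_boundary _ _ (hS _ (List.getElem_mem _)) (hS _ (List.getElem_mem _))).mp
          (h i hi)
      · intro h i hi
        exact (pv_boundary _ _ (hS _ (List.getElem_mem _)) (hS _ (List.getElem_mem _))).mpr
          (h i hi)
    apply pv_bool_ext
    rw [pv_maskA_true_iff mask hlen]
    unfold mask_check_alt
    rw [pv_scanB_false]
    rw [List.isChain_flatten hne]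
    constructor
    · rintro ⟨_, hch⟩
      exact ⟨hS, hbnd.mp hch⟩
    · rintro ⟨_, hch⟩
      exact ⟨hblocks, hbnd.mpr hch⟩
  · -- some byte is invalid: both sides are false
    push_neg at hS
    obtain ⟨i0, hi0, hbad⟩ := hS
    have hBfalse : mask_check_alt mask = false := by
      rcases Bool.dichotomy (mask_check_alt mask) with hb | hb
      · exact hb
      · exfalso
        unfold mask_check_alt at hb
        exact hbad (((pv_scanB_false mask).mp hb).1 i0 hi0)
    rw [hBfalse]
    by_cases hall : ∀ i ∈ mask, (PySem.Int.toBinChars i).length ≤ 8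
    · rcases Bool.dichotomy (mask_check mask) with hA | hA
      · exact hA
      · exfalso
        have hch := (pv_maskA_true_iff mask hall).mp hA
        have hne : [] ∉ mask.map pvBlk := by
          intro hcon
          rcases List.mem_map.mp hcon with ⟨i, _, hblk⟩
          exact pv_blk_ne_nil i hblk
        have hbl := ((List.isChain_flatten hne).mp hch).1 (pvBlk i0) (List.mem_map_of_mem hi0)
        exact hbad ((pv_okA_iff i0).mp ⟨hall i0 hi0, hbl⟩)
    · exact pv_maskA_false mask hall

-- ===== VERDICT (by name: the statement is the Claim_ definition above) =====
theorem mask_check_spec : Claim_equal_mask_check := by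
  intro mask _
  unfold Spec_mask_check
  exact pv_main mask
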